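-- pv_equiv track=rewrite | github.com/taovietduc/Python | 150.py | is_catalan
-- ===== SOURCE A (Python) =====
-- def is_catalan(n):
--     # Nếu n <= 0, không phải số Catalan
--     if n <= 0:
--         return False
--
--     # Tính số Catalan thứ i cho đến khi vượt quá n
--     catalan = 1  # Số Catalan thứ 0
--     i = 0  # Chỉ số hiện tại
--
--     while catalan <= n:
--         if catalan == n:  # Nếu tìm thấy số Catalan bằng n
--             return True
--         # Tính số Catalan tiếp theo theo công thức: C(i+1) = C(i) * 2*(2i+1)/(i+2)
--         i += 1
--         catalan = catalan * 2 * (2*i - 1) // (i + 1)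
--
--     return False  # Không tìm thấy số Catalan bằng n
-- ===== SOURCE B (Python) =====
-- def _comb(m, k):
--     # binomial coefficient C(m, k) via the multiplicative formula
--     r = 1
--     for j in range(1, k + 1):
--         r = r * (m - k + j) // j
--     return r
--
-- def is_catalan(n):
--     if n <= 0:
--         return False
--     i = 0
--     while True:
--         c = _comb(2 * i, i) // (i + 1)  # i-th Catalan number, closed form
--         if c == n:
--             return True
--         if c > n:
--             return False
--         i += 1
-- ===== Notes on version B (the rewrite author's own statement) =====
-- stated objective: alternative
-- what changed: B computes each Catalan number independently from its closed form, a central binomial coefficient (multiplicative helper) floor-divided by the successor of the index, instead of carrying A's running recurrence accumulator from term to term.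
import Mathlib
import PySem

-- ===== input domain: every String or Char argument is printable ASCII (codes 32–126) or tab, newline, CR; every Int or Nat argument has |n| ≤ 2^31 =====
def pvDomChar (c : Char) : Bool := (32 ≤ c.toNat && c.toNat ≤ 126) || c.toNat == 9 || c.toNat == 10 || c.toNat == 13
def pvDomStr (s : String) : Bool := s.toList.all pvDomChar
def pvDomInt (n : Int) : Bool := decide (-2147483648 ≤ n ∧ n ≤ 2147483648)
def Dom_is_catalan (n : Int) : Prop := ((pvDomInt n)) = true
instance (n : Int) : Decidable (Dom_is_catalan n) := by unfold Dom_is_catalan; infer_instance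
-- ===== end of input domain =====

-- B replaces A's running-recurrence accumulator by an independent closed-form
-- binomial computation of each Catalan number (objective: alternative, same cost class).
-- Both ports use fuel 32: on Dom (|n| ≤ 2^31) the loops stop by i = 20, so fuel never runs out.

-- ===== PORT A =====
-- A's while loop: state (catalan, i); fuel makes it total (never exhausted on Dom).
def isCatLoopA (n : Int) (catalan : Int) (i : Int) : Nat → Bool
  | 0 => false
  | fuel + 1 =>
    if catalan ≤ n then
      if catalan = n then true
      else
        let i' := i + 1
        isCatLoopA n (PySem.Int.floordiv (catalan * 2 * (2 * i' - 1)) (i' + 1)) i' fuel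
    else false

def is_catalan (n : Int) : Bool :=
  if n ≤ 0 then false
  else isCatLoopA n 1 0 32

-- ===== PORT B =====
-- B's helper _comb: multiplicative binomial formula.
def combB (m k : Int) : Int :=
  (PySem.List.pyRange 1 (k + 1) 1).foldl
    (fun r j => PySem.Int.floordiv (r * (m - k + j)) j) 1

-- B's while True loop over the index i only; fuel makes it total (never exhausted on Dom).
def isCatLoopB (n : Int) (i : Int) : Nat → Bool
  | 0 => false
  | fuel + 1 =>
    let c := PySem.Int.floordiv (combB (2 * i) i) (i + 1)
    if c = n then true
    else if c > n then false
    else isCatLoopB n (i + 1) fuel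

def is_catalan_alt (n : Int) : Bool :=
  if n ≤ 0 then false
  else isCatLoopB n 0 32

-- ===== PRECONDITION & SPEC =====
def Spec_is_catalan (n : Int) (out : Bool) : Prop := out = is_catalan_alt n
instance (n : Int) (out : Bool) : Decidable (Spec_is_catalan n out) := by unfold Spec_is_catalan; infer_instance

-- ===== CLAIM (what is proved, stated in full; the proofs are below) =====
def Claim_equal_is_catalan : Prop := ∀ (n : Int), Dom_is_catalan n → Spec_is_catalan n (is_catalan n)

-- ===== LEMMAS AND PROOFS =====

-- Reference sequence: A's recurrence, indexed by a Nat.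
def catRef : Nat → Int
  | 0 => 1
  | j + 1 => PySem.Int.floordiv (catRef j * 2 * (2 * ((j : Int) + 1) - 1)) (((j : Int) + 1) + 1)

-- B's per-step closed form agrees with the recurrence for every index the fueled loops can reach.
theorem comb_eq_catRef : ∀ (j : Nat), j < 32 → PySem.Int.floordiv (combB (2 * (j : Int)) (j : Int)) ((j : Int) + 1) = catRef j := by
  decide

theorem loopA_eq_loopB (n : Int) :
    ∀ (fuel j : Nat), j + fuel = 32 →
      isCatLoopA n (catRef j) (j : Int) fuel = isCatLoopB n (j : Int) fuel := by
  intro fuel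
  induction fuel with
  | zero => intro j _; rfl
  | succ f ih =>
    intro j hj
    have hc : PySem.Int.floordiv (combB (2 * (j : Int)) (j : Int)) ((j : Int) + 1) = catRef j :=
      comb_eq_catRef j (by omega)
    simp only [isCatLoopA, isCatLoopB, hc]
    rcases lt_trichotomy (catRef j) n with h | h | h
    · rw [if_pos (le_of_lt h), if_neg (ne_of_lt h), if_neg (ne_of_lt h), if_neg (not_lt.mpr (le_of_lt h))]
      have : ((j : Int) + 1) = ((j + 1 : Nat) : Int) := by push_cast; ring
      rw [this]
      have hrec : PySem.Int.floordiv (catRef j * 2 * (2 * ((j + 1 : Nat) : Int) - 1)) (((j + 1 : Nat) : Int) + 1) = catRef (j + 1) := by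
        show PySem.Int.floordiv _ _ = PySem.Int.floordiv _ _
        push_cast
        ring_nf
      rw [hrec]
      exact ih (j + 1) (by omega)
    · rw [if_pos (le_of_eq h), if_pos h, if_pos h]
    · rw [if_neg (not_le.mpr h), if_neg (ne_of_gt h), if_pos h]

-- ===== VERDICT (by name: the statement is the Claim_ definition above) =====
theorem is_catalan_spec : Claim_equal_is_catalan := by
  intro n _
  unfold Spec_is_catalan is_catalan is_catalan_alt
  by_cases h : n ≤ 0
  · simp [h]
  · simp only [if_neg h]
    have := loopA_eq_loopB n 32 0 rfl
    simpa [catRef] using this
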